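-- pv_equiv track=rewrite | github.com/raffy-bekhit/Reliable-Data-Transport-Protocol | server.py | arrange_seqno
-- ===== SOURCE A (Python) =====
-- def arrange_seqno(seqnos,base):
--
--     temp1 = []
--     temp2 = []
--     seqnos.sort()
--     for i in seqnos:
--         if(i>=base):
--             temp1.append(i)
--         else:
--             temp2.append(i)
--
--     return temp1+temp2
-- ===== SOURCE B (Python) =====
-- def arrange_seqno(seqnos, base):
--     seqnos.sort()
--     lo, hi = 0, len(seqnos)
--     while lo < hi:
--         mid = (lo + hi) // 2
--         if seqnos[mid] < base:
--             lo = mid + 1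
--         else:
--             hi = mid
--     return seqnos[lo:] + seqnos[:lo]
-- ===== Notes on version B (the rewrite author's own statement) =====
-- stated objective: alternative
-- what changed: Replaces the element-by-element partition loop after the sort with a binary search (bisect_left style) for the first element >= base, returning the two slices swapped; the linear partition pass disappears.
import Mathlib
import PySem

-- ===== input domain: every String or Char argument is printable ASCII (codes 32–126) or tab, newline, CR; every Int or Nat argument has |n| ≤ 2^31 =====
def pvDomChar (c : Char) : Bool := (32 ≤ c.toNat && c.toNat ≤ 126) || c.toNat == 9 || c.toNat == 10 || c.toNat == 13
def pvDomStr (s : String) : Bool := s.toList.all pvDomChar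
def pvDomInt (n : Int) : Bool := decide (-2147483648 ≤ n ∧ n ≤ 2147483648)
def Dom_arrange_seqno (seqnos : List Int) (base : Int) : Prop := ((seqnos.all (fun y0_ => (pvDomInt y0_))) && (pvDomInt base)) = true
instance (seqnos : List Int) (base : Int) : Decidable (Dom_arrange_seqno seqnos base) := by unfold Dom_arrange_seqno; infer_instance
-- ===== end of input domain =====

-- B replaces A's linear partition pass after the sort with a binary search for the first
-- element >= base and two swapped slices (alternative decomposition, same asymptotic cost).
-- Both A and B sort `seqnos` in place; the theorem is about the return value.

-- ===== PORT A =====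
def arrange_seqno (seqnos : List Int) (base : Int) : List Int :=
  let s := PySem.List.sorted seqnos (fun x => x) false
  let p := s.foldl (fun (t : List Int × List Int) i =>
      if base ≤ i then (t.1 ++ [i], t.2) else (t.1, t.2 ++ [i])) ([], [])
  p.1 ++ p.2

-- ===== PORT B =====
-- Source B's hand-written lo/hi/mid loop is exactly bisect_left's algorithm, which
-- PySem.List.bisectLeft implements step for step (same loop, same mid arithmetic).
def arrange_seqno_alt (seqnos : List Int) (base : Int) : List Int :=
  let s := PySem.List.sorted seqnos (fun x => x) false
  let lo := PySem.List.bisectLeft s base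
  PySem.List.slice s (some (lo : Int)) none ++ PySem.List.slice s none (some (lo : Int))

-- ===== PRECONDITION & SPEC =====
def Spec_arrange_seqno (seqnos : List Int) (base : Int) (out : List Int) : Prop := out = arrange_seqno_alt seqnos base
instance (seqnos : List Int) (base : Int) (out : List Int) : Decidable (Spec_arrange_seqno seqnos base out) := by unfold Spec_arrange_seqno; infer_instance

-- ===== CLAIM (what is proved, stated in full; the proofs are below) =====
def Claim_equal_arrange_seqno : Prop := ∀ (seqnos : List Int) (base : Int), Dom_arrange_seqno seqnos base → Spec_arrange_seqno seqnos base (arrange_seqno seqnos base)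

-- ===== LEMMAS AND PROOFS =====

-- A's partition loop appends the ≥base elements to the first accumulator and the rest to the second.
theorem arrange_loop_filter (base : Int) (s t1 t2 : List Int) :
    s.foldl (fun (t : List Int × List Int) i =>
      if base ≤ i then (t.1 ++ [i], t.2) else (t.1, t.2 ++ [i])) (t1, t2)
    = (t1 ++ s.filter (fun i => decide (base ≤ i)), t2 ++ s.filter (fun i => !decide (base ≤ i))) := by
  induction s generalizing t1 t2 with
  | nil => simp
  | cons x xs ih =>
    by_cases h : base ≤ x <;> simp [h, ih]

-- On a sorted list, the ≥base filter is the drop at bisect_left and the <base filter is the take.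
theorem filter_ge_eq_drop (base : Int) (s : List Int)
    (hp : s.Pairwise (fun a b => a ≤ b)) :
    s.filter (fun i => decide (base ≤ i)) = s.drop (PySem.List.bisectLeft s base) ∧
    s.filter (fun i => !decide (base ≤ i)) = s.take (PySem.List.bisectLeft s base) := by
  obtain ⟨hlen, hlt, hge⟩ := PySem.List.bisectLeft_spec s base hp
  set lo := PySem.List.bisectLeft s base with hlo
  have htake : ∀ a ∈ s.take lo, a < base := by
    intro a ha
    rw [List.mem_take_iff_getElem] at ha
    obtain ⟨i, hi, rfl⟩ := ha
    exact hlt i (lt_of_lt_of_le (lt_of_lt_of_le hi (min_le_right _ _)) le_rfl)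
      (lt_of_lt_of_le hi (min_le_left _ _))
  have hdrop : ∀ a ∈ s.drop lo, base ≤ a := by
    intro a ha
    rw [List.mem_iff_getElem] at ha
    obtain ⟨i, hi, rfl⟩ := ha
    rw [List.getElem_drop]
    have hi' : i < s.length - lo := by simpa [List.length_drop] using hi
    exact hge (lo + i) (by omega) (Nat.le_add_right _ _)
  constructor
  · conv_lhs => rw [← List.take_append_drop lo s]
    rw [List.filter_append]
    have h1 : (s.take lo).filter (fun i => decide (base ≤ i)) = [] := by
      rw [List.filter_eq_nil_iff]
      intro a ha
      simpa using not_le.mpr (htake a ha)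
    have h2 : (s.drop lo).filter (fun i => decide (base ≤ i)) = s.drop lo := by
      rw [List.filter_eq_self]
      intro a ha
      simpa using hdrop a ha
    rw [h1, h2, List.nil_append]
  · conv_lhs => rw [← List.take_append_drop lo s]
    rw [List.filter_append]
    have h1 : (s.take lo).filter (fun i => !decide (base ≤ i)) = s.take lo := by
      rw [List.filter_eq_self]
      intro a ha
      simpa using not_le.mpr (htake a ha)
    have h2 : (s.drop lo).filter (fun i => !decide (base ≤ i)) = [] := by
      rw [List.filter_eq_nil_iff]
      intro a ha
      simpa using hdrop a ha
    rw [h1, h2, List.append_nil]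

-- ===== VERDICT (by name: the statement is the Claim_ definition above) =====
theorem arrange_seqno_spec : Claim_equal_arrange_seqno := by
  intro seqnos base _
  unfold Spec_arrange_seqno arrange_seqno arrange_seqno_alt
  set s := PySem.List.sorted seqnos (fun x => x) false with hs
  have hp : s.Pairwise (fun a b => a ≤ b) := by
    simpa using PySem.List.sorted_pairwise (xs := seqnos) (key := fun x => x)
  obtain ⟨h1, h2⟩ := filter_ge_eq_drop base s hp
  simp only [arrange_loop_filter, PySem.List.slice_from_natCast, PySem.List.slice_to_natCast]
  rw [List.nil_append, List.nil_append, h1, h2]
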